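-- pv_equiv track=rewrite | github.com/W-CodeTest-Study/22S-CodeTest-Study | week2/suin/func_develop.py | solution
-- ===== SOURCE A (Python) =====
-- import math
--
-- def solution(progresses, speeds):
--     answer = []
--     period = []
--     front = 0 #가장 오랜 시간이 소요되는 기능의 인덱스 저장
--
--     #남은 작업 기간
--     period = [math.ceil((100-r)/s) for r,s in zip(progresses,speeds)]
--
-- #    for i in range(1,len(period)):
-- #        if period[i-1]>=period[i]: #앞에 있는 기능이 더 늦게 개발될 때
-- #            count += 1
-- #        else:
-- #            answer.append(count)
-- #            count = 1 #초기화
--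
--     for i in range(len(period)):
--         if period[i]>period[front]:
--             answer.append(i-front)#배포
--             front=i
--
--     answer.append(len(period)-front)
--     return answer
-- ===== SOURCE B (Python) =====
-- import math
--
-- def solution(progresses, speeds):
--     # stage 1: release time of each feature = running maximum of its period
--     releases = []
--     m = None
--     for r, s in zip(progresses, speeds):
--         p = math.ceil((100 - r) / s)
--         if m is None or p > m:
--             m = p
--         releases.append(m)
--     # stage 2: each deployment batch = multiplicity of one release time
--     counts = {}
--     for t in releases:
--         counts[t] = counts.get(t, 0) + 1
--     return list(counts.values())
-- ===== Notes on version B (the rewrite author's own statement) =====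
-- stated objective: alternative
-- what changed: B computes each feature's release day as the running maximum of the periods and then counts the multiplicity of each release day with a dictionary (insertion order), instead of A's scan that stores a front index and emits index differences at each new maximum.
-- intended difference: When zip(progresses, speeds) is empty (either list empty) A returns [0], a phantom deployment of zero features produced by its unconditional final append; B returns [], the intended 'no deployments'. — e.g. on solution([], []): A returns [0], B returns []
import Mathlib
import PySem

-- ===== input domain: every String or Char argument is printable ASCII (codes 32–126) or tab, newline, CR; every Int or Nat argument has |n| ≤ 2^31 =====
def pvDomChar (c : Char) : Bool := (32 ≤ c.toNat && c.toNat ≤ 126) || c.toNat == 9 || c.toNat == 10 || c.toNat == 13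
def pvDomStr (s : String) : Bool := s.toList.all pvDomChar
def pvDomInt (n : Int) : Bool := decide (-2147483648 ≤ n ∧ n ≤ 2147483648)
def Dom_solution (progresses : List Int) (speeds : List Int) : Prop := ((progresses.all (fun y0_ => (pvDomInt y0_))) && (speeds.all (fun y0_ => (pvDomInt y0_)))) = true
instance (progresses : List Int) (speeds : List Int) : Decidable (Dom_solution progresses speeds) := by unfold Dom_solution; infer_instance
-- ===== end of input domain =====

-- B replaces A's front-index grouping scan by a running-maximum pass plus a dictionary counter over release days; on empty zip A's [0] is replaced by [] (see D_).


-- ===== PORT A =====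
-- math.ceil((100-r)/s): exact as integer ceiling division on Dom (|100-r| and |s| ≤ 2^31+100 < 2^53,
-- so the float quotient rounds to within less than the distance to any other integer); ceil(a/b) = -((-a)//b).
def pyCeilDiv (a b : Int) : Int := -(PySem.Int.floordiv (-a) b)

-- loop body of 'for i in range(len(period))'; state = (answer, front); indices are always in range, default 0 unused
def AStep (period : List Int) (st : List Int × Int) (i : Int) : List Int × Int :=
  if PySem.List.pyGetD period i 0 > PySem.List.pyGetD period st.2 0 then (st.1 ++ [i - st.2], i) else st

def solution (progresses : List Int) (speeds : List Int) : List Int :=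
  let period := (progresses.zip speeds).map (fun rs => pyCeilDiv (100 - rs.1) rs.2)
  let st := (PySem.List.pyRange 0 (period.length : Int) 1).foldl (AStep period) ([], 0)
  st.1 ++ [(period.length : Int) - st.2]

-- ===== PORT B =====
-- loop body of B's first loop on a computed period p; state = (releases, m : Option Int)
def RelStep (st : List Int × Option Int) (p : Int) : List Int × Option Int :=
  match st.2 with
  | none => (st.1 ++ [p], some p)
  | some m => if p > m then (st.1 ++ [p], some p) else (st.1 ++ [m], some m)

def solution_alt (progresses : List Int) (speeds : List Int) : List Int :=
  let st := (progresses.zip speeds).foldl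
    (fun st rs => RelStep st (pyCeilDiv (100 - rs.1) rs.2)) ([], none)
  let counts := st.1.foldl (fun d t => d.insert t (d.getD t 0 + 1)) PySem.Dict.empty
  counts.values

-- ===== PRECONDITION & SPEC =====
-- A raises ZeroDivisionError when a zipped speed is 0; exactly those inputs are excluded.
def Pre_solution (progresses : List Int) (speeds : List Int) : Prop :=
  ∀ s ∈ speeds.take progresses.length, s ≠ 0
instance (progresses : List Int) (speeds : List Int) : Decidable (Pre_solution progresses speeds) := by unfold Pre_solution; infer_instance

def pvWitness_solution : List Int × List Int := ([93, 30, 55], [1, 30, 5])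

-- When zip(progresses, speeds) is empty (either list empty) A returns [0], a phantom deployment of
-- zero features produced by its unconditional final append; B returns [], the intended 'no deployments'.
def D_solution (progresses : List Int) (speeds : List Int) : Prop :=
  progresses = [] ∨ speeds = []
instance (progresses : List Int) (speeds : List Int) : Decidable (D_solution progresses speeds) := by unfold D_solution; infer_instance

def Spec_solution (progresses : List Int) (speeds : List Int) (out : List Int) : Prop :=
  ¬ D_solution progresses speeds → out = solution_alt progresses speeds
instance (progresses : List Int) (speeds : List Int) (out : List Int) : Decidable (Spec_solution progresses speeds out) := by unfold Spec_solution; infer_instance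

def pvDiffWitness_solution : List Int × List Int := ([], [])
def pvDiffWitnessOut_solution : (List Int) × (List Int) := ([0], [])

-- ===== CLAIM (what is proved, stated in full; the proofs are below) =====
def Claim_unchanged_solution : Prop := ∀ (progresses : List Int) (speeds : List Int), Dom_solution progresses speeds → Pre_solution progresses speeds → Spec_solution progresses speeds (solution progresses speeds)
def Claim_changed_solution : Prop := Dom_solution (pvDiffWitness_solution.1) (pvDiffWitness_solution.2) ∧ Pre_solution (pvDiffWitness_solution.1) (pvDiffWitness_solution.2) ∧ D_solution (pvDiffWitness_solution.1) (pvDiffWitness_solution.2) ∧ solution (pvDiffWitness_solution.1) (pvDiffWitness_solution.2) = pvDiffWitnessOut_solution.1 ∧ solution_alt (pvDiffWitness_solution.1) (pvDiffWitness_solution.2) = pvDiffWitnessOut_solution.2 ∧ pvDiffWitnessOut_solution.1 ≠ pvDiffWitnessOut_solution.2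
def Claim_exact_solution : Prop := ∀ (progresses : List Int) (speeds : List Int), Dom_solution progresses speeds → Pre_solution progresses speeds → D_solution progresses speeds → solution progresses speeds ≠ solution_alt progresses speeds

-- ===== LEMMAS AND PROOFS =====

theorem pyGetD_append_left (xs : List Int) (x : Int) (i : Int)
    (h0 : 0 ≤ i) (h1 : i < (xs.length : Int)) :
    PySem.List.pyGetD (xs ++ [x]) i 0 = PySem.List.pyGetD xs i 0 := by
  rw [PySem.List.pyGetD_eq_getElem (xs ++ [x]) 0 h0 (by simp; omega),
      PySem.List.pyGetD_eq_getElem xs 0 h0 h1]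
  exact List.getElem_append_left (by omega)

theorem pyGetD_append_length (xs : List Int) (x : Int) :
    PySem.List.pyGetD (xs ++ [x]) (xs.length : Int) 0 = x := by
  rw [PySem.List.pyGetD_eq_getElem (xs ++ [x]) 0 (by omega)
        (by simp only [List.length_append, List.length_cons, List.length_nil]; push_cast; omega)]
  simp

-- the A-loop only looks at indices < |xs| and keeps front < |xs|, so appending an element does not change it
theorem foldl_AStep_congr (xs : List Int) (x : Int) :
    ∀ (l : List Int) (st : List Int × Int),
      (∀ i ∈ l, 0 ≤ i ∧ i < (xs.length : Int)) → 0 ≤ st.2 → st.2 < (xs.length : Int) →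
      l.foldl (AStep (xs ++ [x])) st = l.foldl (AStep xs) st ∧
        0 ≤ (l.foldl (AStep xs) st).2 ∧ (l.foldl (AStep xs) st).2 < (xs.length : Int) := by
  intro l
  induction l with
  | nil => intro st _ h0 h1; exact ⟨rfl, h0, h1⟩
  | cons i l ih =>
    intro st hl h0 h1
    have hi := hl i (by simp)
    have hstep : AStep (xs ++ [x]) st i = AStep xs st i := by
      unfold AStep
      rw [pyGetD_append_left xs x i hi.1 hi.2, pyGetD_append_left xs x st.2 h0 h1]
    have hnext : 0 ≤ (AStep xs st i).2 ∧ (AStep xs st i).2 < (xs.length : Int) := by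
      unfold AStep; split
      · exact ⟨hi.1, hi.2⟩
      · exact ⟨h0, h1⟩
    simp only [List.foldl_cons, hstep]
    exact ih (AStep xs st i) (fun j hj => hl j (by simp [hj])) hnext.1 hnext.2

-- the shapes of the two loops, as total functions of the period list
def ARun (period : List Int) : List Int × Int :=
  (PySem.List.pyRange 0 (period.length : Int) 1).foldl (AStep period) ([], 0)

def RelRun (period : List Int) : List Int × Option Int :=
  period.foldl RelStep ([], none)

-- invariant tying A's (answer, front) to B's release list: m = period[front] is the running maximum,
-- set(releases) splits as S ++ [m] with S below m, A's answer = counts over S, and count of m = len - front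
theorem run_invariant (xs : List Int) (hne : xs ≠ []) :
    ∃ S : List Int,
      (RelRun xs).2 = some (PySem.List.pyGetD xs (ARun xs).2 0) ∧
      PySem.Set.ofList (RelRun xs).1 = S ++ [PySem.List.pyGetD xs (ARun xs).2 0] ∧
      (∀ q ∈ S, q < PySem.List.pyGetD xs (ARun xs).2 0) ∧
      S.map (fun k => ((RelRun xs).1.count k : Int)) = (ARun xs).1 ∧
      (((RelRun xs).1.count (PySem.List.pyGetD xs (ARun xs).2 0) : Int)
        = (xs.length : Int) - (ARun xs).2) ∧
      0 ≤ (ARun xs).2 ∧ (ARun xs).2 < (xs.length : Int) := by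
  induction xs using List.reverseRecOn with
  | nil => exact absurd rfl hne
  | append_singleton xs x ih =>
    by_cases hxs : xs = []
    · subst hxs
      refine ⟨[], ?_⟩
      have hA : ARun ([] ++ [x]) = ([], 0) := by
        simp [ARun, AStep, PySem.List.pyGetD_zero_cons, PySem.List.pyRange]
      rw [hA]
      simp [RelRun, RelStep, PySem.List.pyGetD_zero_cons, PySem.Set.ofList]
    · obtain ⟨S, hm, hset, hlt, hmap, hcnt, h0, h1⟩ := ih hxs
      set m := PySem.List.pyGetD xs (ARun xs).2 0 with hmdef
      have hlen : ((xs ++ [x]).length : Int) = (xs.length : Int) + 1 := by simp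
      have hrange : PySem.List.pyRange 0 ((xs ++ [x]).length : Int) 1
          = PySem.List.pyRange 0 (xs.length : Int) 1 ++ [(xs.length : Int)] := by
        rw [hlen, PySem.List.pyRange_one_succ_right (by positivity)]
      have hmem : ∀ i ∈ PySem.List.pyRange 0 (xs.length : Int) 1, 0 ≤ i ∧ i < (xs.length : Int) := by
        intro i hi
        have := (PySem.List.mem_pyRange_one).1 hi
        omega
      have hcongr := foldl_AStep_congr xs x (PySem.List.pyRange 0 (xs.length : Int) 1) ([], 0)
        hmem (by simp) (by simp; omega)
      have hA : ARun (xs ++ [x]) = AStep (xs ++ [x]) (ARun xs) (xs.length : Int) := by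
        simp only [ARun, hrange, List.foldl_append, List.foldl_cons, List.foldl_nil]
        rw [hcongr.1]
      have hget_new : PySem.List.pyGetD (xs ++ [x]) (xs.length : Int) 0 = x :=
        pyGetD_append_length xs x
      have hget_front : PySem.List.pyGetD (xs ++ [x]) (ARun xs).2 0 = m :=
        pyGetD_append_left xs x _ h0 h1
      have hR : RelRun (xs ++ [x]) = RelStep (RelRun xs) x := by
        simp [RelRun]
      -- every release is ≤ m
      have hrel_le : ∀ q ∈ (RelRun xs).1, q ≤ m := by
        intro q hq
        have : q ∈ PySem.Set.ofList (RelRun xs).1 := (PySem.Set.mem_ofList _ _).2 hq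
        rw [hset] at this
        rcases List.mem_append.1 this with h | h
        · exact le_of_lt (hlt q h)
        · simp at h; omega
      by_cases hcmp : x > m
      · -- new maximum: A appends len-front and moves front to len; B appends the fresh release x
        have hAstep : ARun (xs ++ [x])
            = ((ARun xs).1 ++ [(xs.length : Int) - (ARun xs).2], (xs.length : Int)) := by
          rw [hA]; unfold AStep; rw [hget_new, hget_front]; simp [hcmp]
        have hRstep : RelRun (xs ++ [x]) = ((RelRun xs).1 ++ [x], some x) := by
          rw [hR]; unfold RelStep; rw [hm]; simp [hcmp]
        have hxnotin : x ∉ (RelRun xs).1 := fun h => by have := hrel_le x h; omega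
        refine ⟨S ++ [m], ?_, ?_, ?_, ?_, ?_, ?_, ?_⟩
        · rw [hAstep, hRstep, hget_new]
        · rw [hAstep, hRstep, hget_new, PySem.Set.ofList_append_singleton, hset,
            PySem.Set.add_of_not_mem (by
              intro h
              rcases List.mem_append.1 h with h' | h'
              · have := hlt x h'; omega
              · simp at h'; omega)]
        · intro q hq
          rw [hAstep, hget_new]
          rcases List.mem_append.1 hq with h | h
          · have := hlt q h; omega
          · simp at h; omega
        · rw [hAstep, hRstep]
          simp only [List.map_append, List.map_cons, List.map_nil]
          congr 1
          · rw [← hmap]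
            apply List.map_congr_left
            intro k hk
            have hkne : k ≠ x := by intro h; have := hlt k hk; omega
            have hz : List.count k [x] = 0 := List.count_eq_zero.2 (by simp [hkne])
            rw [List.count_append, hz, Nat.add_zero]
          · have hz : List.count m [x] = 0 :=
              List.count_eq_zero.2 (by intro hmem; simp at hmem; omega)
            rw [List.count_append, hz, Nat.add_zero, hcnt]
        · rw [hAstep, hRstep, hget_new]
          rw [List.count_append, List.count_eq_zero.2 hxnotin]
          simp
        · rw [hAstep]; omega
        · rw [hAstep, hlen]; omega
      · -- not a new maximum: A is unchanged; B appends another copy of the release m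
        have hAstep : ARun (xs ++ [x]) = ARun xs := by
          rw [hA]; unfold AStep; rw [hget_new, hget_front]; simp [hcmp]
        have hRstep : RelRun (xs ++ [x]) = ((RelRun xs).1 ++ [m], some m) := by
          rw [hR]; unfold RelStep; rw [hm]; simp [hcmp]
        have hmin : m ∈ (RelRun xs).1 := by
          have : m ∈ PySem.Set.ofList (RelRun xs).1 := by rw [hset]; simp
          exact (PySem.Set.mem_ofList _ _).1 this
        refine ⟨S, ?_, ?_, ?_, ?_, ?_, ?_, ?_⟩
        · rw [hAstep, hRstep, hget_front]
        · rw [hAstep, hRstep, hget_front]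
          rw [PySem.Set.ofList_append_singleton,
            PySem.Set.add_of_mem ((PySem.Set.mem_ofList _ _).2 hmin), hset]
        · rw [hAstep, hget_front]; exact hlt
        · rw [hAstep, hRstep]
          rw [← hmap]
          apply List.map_congr_left
          intro k hk
          have hz : List.count k [m] = 0 :=
            List.count_eq_zero.2 (by intro hmem; simp at hmem; have := hlt k hk; omega)
          rw [List.count_append, hz, Nat.add_zero]
        · rw [hAstep, hRstep, hget_front, hlen]
          rw [List.count_append]
          simp
          omega
        · rw [hAstep]; omega
        · rw [hAstep, hlen]; omega

-- B's result is the counts over set(releases) in first-occurrence order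
theorem alt_eq_counts (progresses speeds : List Int) :
    solution_alt progresses speeds
      = (PySem.Set.ofList
          (RelRun ((progresses.zip speeds).map (fun rs => pyCeilDiv (100 - rs.1) rs.2))).1).map
          (fun k => ((RelRun ((progresses.zip speeds).map
              (fun rs => pyCeilDiv (100 - rs.1) rs.2))).1.count k : Int)) := by
  simp only [solution_alt]
  rw [show (progresses.zip speeds).foldl
      (fun st rs => RelStep st (pyCeilDiv (100 - rs.1) rs.2)) ([], none)
      = RelRun ((progresses.zip speeds).map (fun rs => pyCeilDiv (100 - rs.1) rs.2)) by
    rw [RelRun, List.foldl_map]]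
  rw [PySem.Dict.foldl_insert_getD_add_one_eq_counter]
  simp only [PySem.Dict.values, PySem.Dict.items_counter, List.map_map]
  rfl

theorem zip_eq_nil_of_D (progresses speeds : List Int) (hD : D_solution progresses speeds) :
    progresses.zip speeds = [] := by
  rcases hD with h | h <;> subst h <;> simp

theorem solution_of_D (progresses speeds : List Int) (hD : D_solution progresses speeds) :
    solution progresses speeds = [0] := by
  unfold solution
  rw [zip_eq_nil_of_D progresses speeds hD]
  simp [PySem.List.pyRange]

theorem alt_of_D (progresses speeds : List Int) (hD : D_solution progresses speeds) :
    solution_alt progresses speeds = [] := by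
  rw [alt_eq_counts, zip_eq_nil_of_D progresses speeds hD]
  rfl

-- ===== VERDICT (by name: the statements are the Claim_ definitions above) =====
theorem solution_spec : Claim_unchanged_solution := by
  intro progresses speeds _ _ hD
  -- the zipped period list is nonempty
  have hne : (progresses.zip speeds).map (fun rs => pyCeilDiv (100 - rs.1) rs.2) ≠ [] := by
    intro h
    rcases List.map_eq_nil_iff.1 h |> List.zip_eq_nil_iff.1 with h' | h'
    · exact hD (Or.inl h')
    · exact hD (Or.inr h')
  obtain ⟨S, _, hset, _, hmap, hcnt, _, _⟩ := run_invariant _ hne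
  rw [alt_eq_counts]
  rw [show solution progresses speeds
      = (ARun ((progresses.zip speeds).map (fun rs => pyCeilDiv (100 - rs.1) rs.2))).1
        ++ [((((progresses.zip speeds).map (fun rs => pyCeilDiv (100 - rs.1) rs.2)).length : Int)
            - (ARun ((progresses.zip speeds).map (fun rs => pyCeilDiv (100 - rs.1) rs.2))).2)]
      from rfl]
  rw [hset, List.map_append, hmap]
  simp [hcnt]

theorem solution_changed : Claim_changed_solution := by
  unfold Claim_changed_solution; decide

theorem solution_tight : Claim_exact_solution := by
  intro progresses speeds _ _ hD
  rw [solution_of_D progresses speeds hD, alt_of_D progresses speeds hD]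
  simp
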